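-- pv_equiv track=rewrite | github.com/reo91004/emoseum-AI | src/ai/prompt_engineer.py | _get_safety_recommendation
-- ===== SOURCE A (Python) =====
-- from typing import Dict, List, Tuple, Any, Optional
--
-- def _get_safety_recommendation(safety_issues: List[Dict[str, Any]]) -> str:
--     """안전성 검사 결과에 따른 권장사항"""
--
--     if not safety_issues:
--         return "프롬프트가 안전합니다."
--
--     critical_issues = [
--         issue for issue in safety_issues if issue["severity"] == "critical"
--     ]
--     if critical_issues:
--         return "즉시 전문가 상담을 권장합니다. 프롬프트 생성을 중단합니다."
--
--     high_issues = [issue for issue in safety_issues if issue["severity"] == "high"]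
--     if high_issues:
--         return "부적절한 내용이 감지되었습니다. 프롬프트를 수정하거나 다른 접근을 시도하세요."
--
--     return "일부 주의가 필요한 내용이 있습니다. 내용을 검토해주세요."
-- ===== SOURCE B (Python) =====
-- _SEVERITY_RANK = {"critical": 2, "high": 1}
--
-- _MESSAGES = [
--     "일부 주의가 필요한 내용이 있습니다. 내용을 검토해주세요.",
--     "부적절한 내용이 감지되었습니다. 프롬프트를 수정하거나 다른 접근을 시도하세요.",
--     "즉시 전문가 상담을 권장합니다. 프롬프트 생성을 중단합니다.",
-- ]
--
--
-- def _get_safety_recommendation(safety_issues):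
--     """안전성 검사 결과에 따른 권장사항"""
--     if not safety_issues:
--         return "프롬프트가 안전합니다."
--     worst = max(_SEVERITY_RANK.get(issue["severity"], 0) for issue in safety_issues)
--     return _MESSAGES[worst]
-- ===== Notes on version B (the rewrite author's own statement) =====
-- stated objective: alternative
-- what changed: Replaces A's decision chain of two filtering comprehensions with a table-driven formulation: severities are mapped to numeric ranks, the maximum rank is taken, and the result is an index into a message table.
import Mathlib
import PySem

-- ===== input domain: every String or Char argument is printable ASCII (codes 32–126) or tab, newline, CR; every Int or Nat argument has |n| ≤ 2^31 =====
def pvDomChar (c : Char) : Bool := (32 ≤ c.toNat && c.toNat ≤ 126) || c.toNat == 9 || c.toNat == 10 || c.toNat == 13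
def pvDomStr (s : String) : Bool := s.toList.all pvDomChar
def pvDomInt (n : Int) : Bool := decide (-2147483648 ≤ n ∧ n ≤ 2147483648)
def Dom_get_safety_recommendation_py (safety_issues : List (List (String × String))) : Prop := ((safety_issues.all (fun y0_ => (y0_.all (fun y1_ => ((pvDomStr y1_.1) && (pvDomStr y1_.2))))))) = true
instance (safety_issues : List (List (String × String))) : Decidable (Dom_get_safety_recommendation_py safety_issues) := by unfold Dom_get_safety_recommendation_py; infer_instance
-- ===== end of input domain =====

-- ===== PORT A =====
-- B is table-driven: severity → numeric rank via a dict, max rank, index into a message table (objective: alternative).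
-- issue["severity"]: Python raises KeyError if the key is missing; Pre_ excludes that, lookup via Dict.getD.
def pvSev (issue : List (String × String)) : String :=
  (PySem.Dict.mk issue).getD "severity" ""

def get_safety_recommendation_py (safety_issues : List (List (String × String))) : String :=
  if safety_issues = [] then "프롬프트가 안전합니다."
  else
    let critical_issues := safety_issues.filter (fun issue => pvSev issue == "critical")
    if critical_issues ≠ [] then "즉시 전문가 상담을 권장합니다. 프롬프트 생성을 중단합니다."
    else
      let high_issues := safety_issues.filter (fun issue => pvSev issue == "high")
      if high_issues ≠ [] then "부적절한 내용이 감지되었습니다. 프롬프트를 수정하거나 다른 접근을 시도하세요."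
      else "일부 주의가 필요한 내용이 있습니다. 내용을 검토해주세요."

-- ===== PORT B =====
-- _SEVERITY_RANK.get(issue["severity"], 0)
def pvRank (issue : List (String × String)) : Int :=
  (PySem.Dict.mk [("critical", (2 : Int)), ("high", 1)]).getD (pvSev issue) 0

-- _MESSAGES
def pvMessages : List String :=
  ["일부 주의가 필요한 내용이 있습니다. 내용을 검토해주세요.",
   "부적절한 내용이 감지되었습니다. 프롬프트를 수정하거나 다른 접근을 시도하세요.",
   "즉시 전문가 상담을 권장합니다. 프롬프트 생성을 중단합니다."]

def get_safety_recommendation_py_alt (safety_issues : List (List (String × String))) : String :=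
  if safety_issues = [] then "프롬프트가 안전합니다."
  else
    -- max(...) over a nonempty generator: max? is some here, .getD 0 never fires
    let worst := (PySem.List.max? (safety_issues.map pvRank) (fun r => r)).getD 0
    -- _MESSAGES[worst]: worst ∈ {0,1,2}, always in range, so the total indexing form is exact here
    PySem.List.pyGetD pvMessages worst ""

-- ===== PRECONDITION & SPEC =====
-- Pre_ excludes exactly the inputs where Python A raises KeyError: an issue dict without a "severity" key.
def Pre_get_safety_recommendation_py (safety_issues : List (List (String × String))) : Prop :=
  ∀ issue ∈ safety_issues, "severity" ∈ issue.map Prod.fst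
instance (safety_issues : List (List (String × String))) : Decidable (Pre_get_safety_recommendation_py safety_issues) := by unfold Pre_get_safety_recommendation_py; infer_instance
def pvWitness_get_safety_recommendation_py : (List (List (String × String))) := [[("severity", "high")], [("severity", "low")]]
def Spec_get_safety_recommendation_py (safety_issues : List (List (String × String))) (out : String) : Prop := out = get_safety_recommendation_py_alt safety_issues
instance (safety_issues : List (List (String × String))) (out : String) : Decidable (Spec_get_safety_recommendation_py safety_issues out) := by unfold Spec_get_safety_recommendation_py; infer_instance

-- ===== CLAIM (what is proved, stated in full; the proofs are below) =====
def Claim_equal_get_safety_recommendation_py : Prop := ∀ (safety_issues : List (List (String × String))), Dom_get_safety_recommendation_py safety_issues → Pre_get_safety_recommendation_py safety_issues → Spec_get_safety_recommendation_py safety_issues (get_safety_recommendation_py safety_issues)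

-- ===== LEMMAS AND PROOFS =====
-- worst severity of a list, as A decides it
def pvG (xs : List (List (String × String))) : Int :=
  if xs.any (fun i => pvSev i == "critical") then 2
  else if xs.any (fun i => pvSev i == "high") then 1
  else 0

theorem pvRank_eq (i : List (String × String)) :
    pvRank i = if pvSev i = "critical" then 2 else if pvSev i = "high" then 1 else 0 := by
  unfold pvRank
  generalize pvSev i = s
  rw [PySem.Dict.getD_eq_get?_getD, PySem.Dict.get?_mk_cons]
  by_cases h1 : s = "critical"
  · simp [h1]
  · rw [if_neg (by simp [beq_iff_eq]; exact fun h => h1 h.symm), PySem.Dict.get?_mk_cons]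
    by_cases h2 : s = "high"
    · simp [h2]
    · rw [if_neg (by simp [beq_iff_eq]; exact fun h => h2 h.symm)]
      simp [h1, h2, PySem.Dict.get?]

theorem pvG_bounds (xs : List (List (String × String))) : 0 ≤ pvG xs ∧ pvG xs ≤ 2 := by
  unfold pvG; split_ifs <;> omega

theorem pvG_cons (x : List (String × String)) (t : List (List (String × String))) :
    pvG (x :: t) = max (pvRank x) (pvG t) := by
  have hb := pvG_bounds t
  rw [pvRank_eq]
  unfold pvG
  simp only [List.any_cons, Bool.or_eq_true, beq_iff_eq]
  split_ifs <;> first | omega | tauto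

theorem pvG_nil : pvG [] = 0 := by unfold pvG; simp

theorem pvRank_nonneg (i : List (String × String)) : 0 ≤ pvRank i := by
  rw [pvRank_eq]; split_ifs <;> omega

theorem pvFoldl_max (t : List (List (String × String))) (m : Int) (hm : 0 ≤ m) :
    (t.map pvRank).foldl max m = max m (pvG t) := by
  induction t generalizing m with
  | nil => simp [pvG_nil]; omega
  | cons x t ih =>
    rw [List.map_cons, List.foldl_cons,
        ih (max m (pvRank x)) (le_trans hm (le_max_left _ _)), pvG_cons, max_assoc]

theorem pvFilter_ne_nil_iff_any (xs : List (List (String × String))) (p : List (String × String) → Bool) :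
    (xs.filter p ≠ []) ↔ xs.any p := by
  simp [List.filter_eq_nil_iff, List.any_eq_true]

-- ===== VERDICT (by name: the statement is the Claim_ definition above) =====
theorem pvAlt_eq (xs : List (List (String × String))) (h : xs ≠ []) :
    get_safety_recommendation_py_alt xs = PySem.List.pyGetD pvMessages (pvG xs) "" := by
  unfold get_safety_recommendation_py_alt
  rw [if_neg h]
  rcases xs with _ | ⟨x, t⟩
  · exact absurd rfl h
  · rw [List.map_cons, PySem.List.max?_id_cons, Option.getD_some,
        pvFoldl_max t (pvRank x) (pvRank_nonneg x), ← pvG_cons]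

theorem get_safety_recommendation_py_spec : Claim_equal_get_safety_recommendation_py := by
  intro xs _ _
  unfold Spec_get_safety_recommendation_py
  by_cases hnil : xs = []
  · simp [hnil, get_safety_recommendation_py, get_safety_recommendation_py_alt]
  · rw [pvAlt_eq xs hnil]
    unfold get_safety_recommendation_py pvG
    rw [if_neg hnil]
    by_cases hc : xs.any (fun issue => pvSev issue == "critical")
    · rw [if_pos ((pvFilter_ne_nil_iff_any xs _).mpr hc), if_pos hc]
      rfl
    · have h1 : ¬ (xs.filter (fun issue => pvSev issue == "critical") ≠ []) := by
        rw [pvFilter_ne_nil_iff_any]; exact hc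
      rw [if_neg h1, if_neg hc]
      by_cases hh : xs.any (fun issue => pvSev issue == "high")
      · rw [if_pos ((pvFilter_ne_nil_iff_any xs _).mpr hh), if_pos hh]
        rfl
      · have h2 : ¬ (xs.filter (fun issue => pvSev issue == "high") ≠ []) := by
          rw [pvFilter_ne_nil_iff_any]; exact hh
        rw [if_neg h2, if_neg hh]
        rfl
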